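-- pv_equiv track=rewrite | github.com/Aquachoc/TTT9 | TTT.py | nbPions
-- ===== SOURCE A (Python) =====
-- def nbPions(grid, nbPlayer, m=[]): #how many pawns already in the targer square
--     if not len(m):
--         k=-1
--         for i in range(3):
--             for j in range(3):
--                 k = max(k,nbPions(grid,nbPlayer, [i,j]))
--
--     else:
--         k=0
--         for i in range(3):
--             for j in range(3):
--                 if grid[i][j]==nbPlayer:
--                     k+=1
--     return k
-- ===== SOURCE B (Python) =====
-- def nbPions(grid, nbPlayer, m=[]):  # count nbPlayer's pawns in the 3x3 grid; m kept for signature compatibility, unused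
--     return sum(grid[i][j] == nbPlayer for i in range(3) for j in range(3))
-- ===== Notes on version B (the rewrite author's own statement) =====
-- stated objective: simpler
-- what changed: Replaced A's recursive max-over-nine-identical-recounts structure (and its branch on m) by a single flat sum of boolean cell comparisons over the 3x3 grid.
import Mathlib
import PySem

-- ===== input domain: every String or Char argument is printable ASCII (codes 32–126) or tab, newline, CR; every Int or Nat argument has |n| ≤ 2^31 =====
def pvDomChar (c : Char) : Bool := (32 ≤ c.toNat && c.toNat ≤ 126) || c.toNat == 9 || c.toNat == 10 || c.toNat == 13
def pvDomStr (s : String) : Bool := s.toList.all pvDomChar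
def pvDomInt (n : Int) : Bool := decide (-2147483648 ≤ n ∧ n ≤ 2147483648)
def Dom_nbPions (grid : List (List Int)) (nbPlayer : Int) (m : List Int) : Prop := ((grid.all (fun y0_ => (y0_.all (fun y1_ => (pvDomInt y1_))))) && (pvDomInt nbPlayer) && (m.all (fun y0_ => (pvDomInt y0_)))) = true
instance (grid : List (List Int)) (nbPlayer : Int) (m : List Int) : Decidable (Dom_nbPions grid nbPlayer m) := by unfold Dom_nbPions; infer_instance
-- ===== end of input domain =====

-- ===== PORT A =====
-- cell test of A's else branch: grid[i][j] == nbPlayer (an out-of-range index is an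
-- IndexError in Python, excluded by Pre_; here it reads as none and never equals some nbPlayer)
def cellOk (grid : List (List Int)) (nbPlayer : Int) (i j : Int) : Bool :=
  ((PySem.List.pyGet? grid i).bind (fun row => PySem.List.pyGet? row j)) == some nbPlayer

-- else-branch of A: k=0; for i in range(3): for j in range(3): if grid[i][j]==nbPlayer: k+=1
def nbPionsCount (grid : List (List Int)) (nbPlayer : Int) : Int :=
  (PySem.List.pyRange 0 3 1).foldl (fun k i =>
    (PySem.List.pyRange 0 3 1).foldl (fun k j =>
      if cellOk grid nbPlayer i j then k + 1 else k) k) 0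

-- A's recursive call nbPions(grid, nbPlayer, [i,j]) always has a nonempty m, so it executes
-- exactly the else branch (nbPionsCount); the port unrolls that one-level recursion.
def nbPions (grid : List (List Int)) (nbPlayer : Int) (m : List Int) : Int :=
  if m.length = 0 then
    (PySem.List.pyRange 0 3 1).foldl (fun k _i =>
      (PySem.List.pyRange 0 3 1).foldl (fun k _j =>
        max k (nbPionsCount grid nbPlayer)) k) (-1)
  else
    nbPionsCount grid nbPlayer

-- ===== PORT B =====
-- B: sum(grid[i][j] == nbPlayer for i in range(3) for j in range(3)); m unused.
-- The double generator is rendered as a sum of per-i sums of 0/1 comparison values.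
def nbPions_alt (grid : List (List Int)) (nbPlayer : Int) (_m : List Int) : Int :=
  ((PySem.List.pyRange 0 3 1).map (fun i =>
    ((PySem.List.pyRange 0 3 1).map (fun j =>
      if ((PySem.List.pyGet? grid i).bind (fun row => PySem.List.pyGet? row j)) == some nbPlayer
      then (1 : Int) else 0)).sum)).sum

-- ===== PRECONDITION & SPEC =====
-- Pre_: the Python A indexes grid[i][j] for i,j in 0..2, so it raises IndexError unless
-- there are at least 3 rows and each of the first 3 rows has at least 3 cells.
def Pre_nbPions (grid : List (List Int)) (_nbPlayer : Int) (_m : List Int) : Prop :=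
  3 ≤ grid.length ∧ ∀ row ∈ grid.take 3, 3 ≤ row.length
instance (grid : List (List Int)) (nbPlayer : Int) (m : List Int) : Decidable (Pre_nbPions grid nbPlayer m) := by unfold Pre_nbPions; infer_instance
def pvWitness_nbPions : List (List Int) × Int × List Int := ([[1,0,2],[2,1,0],[0,0,1]], 1, [])
def Spec_nbPions (grid : List (List Int)) (nbPlayer : Int) (m : List Int) (out : Int) : Prop := out = nbPions_alt grid nbPlayer m
instance (grid : List (List Int)) (nbPlayer : Int) (m : List Int) (out : Int) : Decidable (Spec_nbPions grid nbPlayer m out) := by unfold Spec_nbPions; infer_instance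

-- ===== CLAIM (what is proved, stated in full; the proofs are below) =====
def Claim_equal_nbPions : Prop := ∀ (grid : List (List Int)) (nbPlayer : Int) (m : List Int), Dom_nbPions grid nbPlayer m → Pre_nbPions grid nbPlayer m → Spec_nbPions grid nbPlayer m (nbPions grid nbPlayer m)

-- ===== LEMMAS AND PROOFS =====
lemma range3 : PySem.List.pyRange 0 3 1 = [0,1,2] := by decide

lemma if_bool_add (b : Bool) (k : Int) :
    (if b then k + 1 else k) = k + (if b then (1 : Int) else 0) := by
  cases b <;> simp

lemma foldl_ge (f : Int → Int → Int) (h : ∀ k x, k ≤ f k x) :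
    ∀ (l : List Int) (k : Int), k ≤ List.foldl f k l := by
  intro l; induction l with
  | nil => intro k; simp
  | cons x xs ih => intro k; exact le_trans (h k x) (ih (f k x))

lemma nbPionsCount_nonneg (grid : List (List Int)) (nbPlayer : Int) :
    0 ≤ nbPionsCount grid nbPlayer := by
  unfold nbPionsCount
  refine foldl_ge _ (fun k i => foldl_ge _ (fun k j => ?_) _ k) _ 0
  split <;> omega

-- the two 9-cell scans compute the same value on EVERY grid (both read the same 9 cells)
lemma nbPions_core (grid : List (List Int)) (nbPlayer : Int) (m : List Int) :
    nbPionsCount grid nbPlayer = nbPions_alt grid nbPlayer m := by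
  unfold nbPionsCount nbPions_alt cellOk
  rw [range3]
  simp only [List.foldl_cons, List.foldl_nil, List.map_cons, List.map_nil,
    List.sum_cons, List.sum_nil]
  simp only [if_bool_add]
  ring

-- ===== VERDICT (by name: the statement is the Claim_ definition above) =====
theorem nbPions_spec : Claim_equal_nbPions := by
  intro grid nbPlayer m _hdom hpre
  unfold Spec_nbPions nbPions
  have hc : nbPionsCount grid nbPlayer = nbPions_alt grid nbPlayer m :=
    nbPions_core grid nbPlayer m
  by_cases hm : m.length = 0
  · rw [if_pos hm, ← hc]
    have hnn := nbPionsCount_nonneg grid nbPlayer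
    rw [range3]
    simp only [List.foldl_cons, List.foldl_nil]
    omega
  · rw [if_neg hm, hc]
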